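-- pv_equiv track=rewrite | github.com/baquyptit2001/ctdl-gt | ly_thuyet/buoi4/sap_dat_xau_ky_tu.py | check
-- ===== SOURCE A (Python) =====
-- def check(s):
--     store = dict()
--     max = 0
--     for i in range(len(s)):
--         store[s[i]] = store.get(s[i],0)+1
--         if store[s[i]]>max:
--             max=store[s[i]]
--     if max<=(len(s)+1)/2:
--         return 1
--     return -1
-- ===== SOURCE B (Python) =====
-- def check(s):
--     t = sorted(s)
--     max_run = 0
--     run = 0
--     prev = None
--     for c in t:
--         if prev == c:
--             run += 1
--         else:
--             run = 1
--             prev = c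
--         if run > max_run:
--             max_run = run
--     if max_run <= (len(s) + 1) / 2:
--         return 1
--     return -1
-- ===== Notes on version B (the rewrite author's own statement) =====
-- stated objective: alternative
-- what changed: Replaces A's single-pass dict counting with a sort-then-scan strategy: sort the characters, then find the longest run of consecutive equal characters in one linear scan (no dictionary at all), and apply the same (len+1)/2 threshold test.
import Mathlib
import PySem

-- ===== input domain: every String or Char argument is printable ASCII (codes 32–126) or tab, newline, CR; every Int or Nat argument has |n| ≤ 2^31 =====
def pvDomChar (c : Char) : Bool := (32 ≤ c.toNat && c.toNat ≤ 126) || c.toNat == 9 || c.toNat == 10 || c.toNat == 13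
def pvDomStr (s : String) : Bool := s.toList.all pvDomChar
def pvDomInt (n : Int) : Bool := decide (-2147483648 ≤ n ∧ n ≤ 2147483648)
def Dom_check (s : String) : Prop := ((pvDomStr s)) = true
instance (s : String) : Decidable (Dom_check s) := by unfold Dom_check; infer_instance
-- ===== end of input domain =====

-- B replaces A's single-pass dict counting with sort-then-scan: sort the characters and find the
-- longest run of consecutive equal characters; an alternative decomposition, not faster.
-- A's float test max <= (len(s)+1)/2 is ported as the integer test 2*max <= len(s)+1, which is
-- exact: both sides are integers and the float division is exact at these magnitudes.

-- ===== PORT A =====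
-- the loop 'for i in range(len(s))' indexes s[i] for each i in order, i.e. visits the
-- characters of s in order; ported as a foldl over s.toList with state (store, max)
def checkStep (st : PySem.Dict Char Int × Int) (c : Char) : PySem.Dict Char Int × Int :=
  let d := st.1.insert c (st.1.getD c 0 + 1)
  let cnt := d.getD c 0
  (d, if cnt > st.2 then cnt else st.2)

def check (s : String) : Int :=
  let st := s.toList.foldl checkStep (PySem.Dict.empty, 0)
  if 2 * st.2 ≤ (s.toList.length : Int) + 1 then 1 else -1

-- ===== PORT B =====
-- state (prev, run, max_run) of Source B's scan over the sorted characters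
def runStep (st : Option Char × Int × Int) (c : Char) : Option Char × Int × Int :=
  let pr : Option Char × Int :=
    if st.1 = some c then (st.1, st.2.1 + 1) else (some c, 1)
  (pr.1, pr.2, if pr.2 > st.2.2 then pr.2 else st.2.2)

def check_alt (s : String) : Int :=
  let t := PySem.List.sorted s.toList (fun c => c) false
  let st := t.foldl runStep (none, 0, 0)
  if 2 * st.2.2 ≤ (s.toList.length : Int) + 1 then 1 else -1

-- ===== PRECONDITION & SPEC =====
def Spec_check (s : String) (out : Int) : Prop := out = check_alt s
instance (s : String) (out : Int) : Decidable (Spec_check s out) := by unfold Spec_check; infer_instance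

-- ===== CLAIM =====
def Claim_equal_check : Prop := ∀ (s : String), Dom_check s → Spec_check s (check s)

-- ===== LEMMAS AND PROOFS =====

-- the maximum multiplicity of any character of l
def maxCnt (l : List Char) : Int :=
  (PySem.Set.ofList l).foldl (fun a c => max a (PySem.List.count l c : Int)) 0

theorem foldl_max_le (ds : List Char) (f : Char → Int) (a B : Int)
    (ha : a ≤ B) (hf : ∀ c ∈ ds, f c ≤ B) :
    ds.foldl (fun acc c => max acc (f c)) a ≤ B := by
  induction ds generalizing a with
  | nil => simpa using ha
  | cons x t ih =>
    simp only [List.foldl_cons]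
    exact ih _ (max_le ha (hf x (by simp))) (fun c hc => hf c (by simp [hc]))

theorem maxCnt_append_singleton (p : List Char) (x : Char) :
    maxCnt (p ++ [x]) = max (maxCnt p) ((p.count x : Int) + 1) := by
  unfold maxCnt
  simp only [PySem.List.count_eq]
  apply le_antisymm
  · apply foldl_max_le
    · have : (0:Int) ≤ (p.count x : Int) + 1 := by positivity
      exact this.trans (le_max_right _ _)
    · intro c hc
      rw [PySem.Set.mem_ofList] at hc
      by_cases hcx : c = x
      · subst hcx
        have : ((p ++ [c]).count c : Int) = (p.count c : Int) + 1 := by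
          simp [List.count_append]
        rw [this]; exact le_max_right _ _
      · have hcp : c ∈ p := by
          rcases List.mem_append.mp hc with h | h
          · exact h
          · simp at h; exact absurd h hcx
        have hcount : ((p ++ [x]).count c : Int) = (p.count c : Int) := by
          simp [List.count_append, Ne.symm hcx]
        rw [hcount]
        have h2 := (PySem.List.le_foldl_max_int (PySem.Set.ofList p)
          (fun c => (p.count c : Int)) 0).2 c ((PySem.Set.mem_ofList _ _).mpr hcp)
        exact h2.trans (le_max_left _ _)
  · apply max_le
    · apply foldl_max_le
      · exact (PySem.List.le_foldl_max_int (PySem.Set.ofList (p ++ [x]))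
          (fun c => ((p ++ [x]).count c : Int)) 0).1
      · intro c hc
        rw [PySem.Set.mem_ofList] at hc
        have hc' : c ∈ PySem.Set.ofList (p ++ [x]) :=
          (PySem.Set.mem_ofList _ _).mpr (List.mem_append.mpr (Or.inl hc))
        have h2 := (PySem.List.le_foldl_max_int (PySem.Set.ofList (p ++ [x]))
          (fun c => ((p ++ [x]).count c : Int)) 0).2 c hc'
        have hmono : ((p.count c : Int)) ≤ ((p ++ [x]).count c : Int) := by
          simp [List.count_append]
        exact hmono.trans h2
    · have hx : x ∈ PySem.Set.ofList (p ++ [x]) :=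
        (PySem.Set.mem_ofList _ _).mpr (List.mem_append.mpr (Or.inr (by simp)))
      have h2 := (PySem.List.le_foldl_max_int (PySem.Set.ofList (p ++ [x]))
        (fun c => ((p ++ [x]).count c : Int)) 0).2 x hx
      have : ((p ++ [x]).count x : Int) = (p.count x : Int) + 1 := by
        simp [List.count_append]
      rw [this] at h2; exact h2

-- maxCnt is invariant under permutation
theorem maxCnt_le_of_perm (l l' : List Char) (h : l.Perm l') : maxCnt l ≤ maxCnt l' := by
  unfold maxCnt
  simp only [PySem.List.count_eq]
  apply foldl_max_le
  · exact (PySem.List.le_foldl_max_int (PySem.Set.ofList l')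
      (fun c => (l'.count c : Int)) 0).1
  · intro c hc
    rw [PySem.Set.mem_ofList] at hc
    have hc' : c ∈ PySem.Set.ofList l' :=
      (PySem.Set.mem_ofList _ _).mpr (h.mem_iff.mp hc)
    have h2 := (PySem.List.le_foldl_max_int (PySem.Set.ofList l')
      (fun c => (l'.count c : Int)) 0).2 c hc'
    have : (l.count c : Int) = (l'.count c : Int) := by
      rw [h.count_eq c]
    rw [this]; exact h2

theorem maxCnt_perm (l l' : List Char) (h : l.Perm l') : maxCnt l = maxCnt l' :=
  le_antisymm (maxCnt_le_of_perm l l' h) (maxCnt_le_of_perm l' l h.symm)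

-- ===== A's side: loop invariant (dict counting) =====
def dstep (d : PySem.Dict Char Int) (c : Char) : PySem.Dict Char Int :=
  d.insert c (d.getD c 0 + 1)

theorem getD_dfold (p : List Char) (c : Char) :
    (p.foldl dstep PySem.Dict.empty).getD c 0 = (p.count c : Int) := by
  have h := PySem.Dict.getD_foldl_insert_add_one (l := p)
    (d := (PySem.Dict.empty : PySem.Dict Char Int)) (v := c)
  have hd : dstep = fun (d : PySem.Dict Char Int) x => d.insert x (d.getD x 0 + 1) := rfl
  rw [hd, h]
  simp [PySem.Dict.empty, PySem.Dict.getD, PySem.Dict.get?]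

theorem loop_invariant (r p : List Char) :
    (r.foldl checkStep (p.foldl dstep PySem.Dict.empty, maxCnt p)).2 = maxCnt (p ++ r) := by
  induction r generalizing p with
  | nil => simp
  | cons x t ih =>
    have hstep : checkStep (p.foldl dstep PySem.Dict.empty, maxCnt p) x
        = ((p ++ [x]).foldl dstep PySem.Dict.empty, maxCnt (p ++ [x])) := by
      have hd : dstep (p.foldl dstep PySem.Dict.empty) x
          = (p ++ [x]).foldl dstep PySem.Dict.empty := by
        simp [List.foldl_append]
      have hcnt : ((p ++ [x]).foldl dstep PySem.Dict.empty).getD x 0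
          = (p.count x : Int) + 1 := by
        rw [getD_dfold]; simp [List.count_append]
      show (dstep (p.foldl dstep PySem.Dict.empty) x,
            if (dstep (p.foldl dstep PySem.Dict.empty) x).getD x 0 > maxCnt p
            then (dstep (p.foldl dstep PySem.Dict.empty) x).getD x 0 else maxCnt p)
          = _
      rw [hd, hcnt, maxCnt_append_singleton]
      congr 1
      rcases le_or_gt ((p.count x : Int) + 1) (maxCnt p) with h | h
      · rw [if_neg (by omega), max_eq_left h]
      · rw [if_pos h, max_eq_right (le_of_lt h)]
    rw [List.foldl_cons, hstep, ih (p ++ [x])]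
    congr 1
    simp

-- ===== B's side: run-length scan invariant over a sorted list =====
-- the scan state after processing p: (last element, multiplicity of the last element, maxCnt p)
def stOf (p : List Char) : Option Char × Int × Int :=
  (p.getLast?, (match p.getLast? with | none => 0 | some x => (p.count x : Int)), maxCnt p)

theorem run_step (p : List Char) (c : Char) (hpw : (p ++ [c]).Pairwise (· ≤ ·)) :
    runStep (stOf p) c = stOf (p ++ [c]) := by
  have hcount : (p.count c : Int) + 1 = ((p ++ [c]).count c : Int) := by
    simp [List.count_append]
  have hlast : (p ++ [c]).getLast? = some c := by simp
  have hkey : (if (stOf p).1 = some c then ((stOf p).1, (stOf p).2.1 + 1) else (some c, (1:Int)))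
      = (some c, (p.count c : Int) + 1) := by
    rcases hp : p.getLast? with _ | x
    · -- p = []
      have hpnil : p = [] := List.getLast?_eq_none_iff.mp hp
      subst hpnil
      simp [stOf]
    · by_cases hcx : x = c
      · subst hcx
        simp [stOf, hp]
      · -- prev = some x ≠ some c; c does not occur in p at all
        have hcp : c ∉ p := by
          intro hcmem
          -- p = dropLast ++ [x]
          have hpd : p.dropLast ++ [x] = p := List.dropLast_append_getLast? x hp
          -- every element of p is ≤ x (pairwise within p), and x ≤ c (pairwise with the appended c)
          have hpwp : p.Pairwise (· ≤ ·) := hpw.sublist (List.sublist_append_left _ _)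
          have hcx' : c ≤ x := by
            rw [← hpd] at hcmem hpwp
            rcases List.mem_append.mp hcmem with h | h
            · have := (List.pairwise_append.mp hpwp).2.2
              exact this c h x (by simp)
            · simp at h; exact le_of_eq h
          have hxc : x ≤ c := by
            have := (List.pairwise_append.mp hpw).2.2
            exact this x (by rw [← hpd]; simp) c (by simp)
          exact hcx (le_antisymm hxc hcx')
        have : (p.count c : Int) = 0 := by simp [List.count_eq_zero_of_not_mem hcp]
        simp [stOf, hp, hcx, this]
  show (_, _, if _ > (stOf p).2.2 then _ else (stOf p).2.2) = _
  rw [hkey]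
  have hmx : (stOf p).2.2 = maxCnt p := rfl
  simp only [hmx]
  have hnew : maxCnt (p ++ [c]) = max (maxCnt p) ((p.count c : Int) + 1) :=
    maxCnt_append_singleton p c
  refine Prod.ext (by simp [stOf, hlast]) (Prod.ext ?_ ?_)
  · show (p.count c : Int) + 1
      = (match (p ++ [c]).getLast? with | none => 0 | some x => (((p ++ [c]).count x : Int)))
    rw [hlast]
    exact hcount
  · show (if (p.count c : Int) + 1 > maxCnt p then (p.count c : Int) + 1 else maxCnt p)
      = maxCnt (p ++ [c])
    rw [hnew]
    rcases le_or_gt ((p.count c : Int) + 1) (maxCnt p) with h | h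
    · rw [if_neg (by omega), max_eq_left h]
    · rw [if_pos h, max_eq_right (le_of_lt h)]

theorem run_invariant (r p : List Char) (h : (p ++ r).Pairwise (· ≤ ·)) :
    r.foldl runStep (stOf p) = stOf (p ++ r) := by
  induction r generalizing p with
  | nil => simp
  | cons x t ih =>
    have h1 : (p ++ [x]).Pairwise (· ≤ ·) := by
      exact h.sublist (List.Sublist.append (List.Sublist.refl p) (by simp))
    have h2 : ((p ++ [x]) ++ t).Pairwise (· ≤ ·) := by simpa using h
    rw [List.foldl_cons, run_step p x h1, ih (p ++ [x]) h2]
    congr 1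
    simp

theorem check_eq_alt (s : String) : check s = check_alt s := by
  have hA : (s.toList.foldl checkStep (PySem.Dict.empty, 0)).2 = maxCnt s.toList := by
    simpa using loop_invariant s.toList []
  have hpw : (PySem.List.sorted s.toList (fun c => c) false).Pairwise (· ≤ ·) := by
    simpa using PySem.List.sorted_pairwise (xs := s.toList) (key := fun c => c)
  have hB : ((PySem.List.sorted s.toList (fun c => c) false).foldl runStep (none, 0, 0)).2.2
      = maxCnt s.toList := by
    have h0 : (none, (0:Int), (0:Int)) = stOf [] := by simp [stOf, maxCnt, PySem.Set.ofList]
    rw [h0, run_invariant _ [] (by simpa using hpw)]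
    show maxCnt ([] ++ PySem.List.sorted s.toList (fun c => c) false) = maxCnt s.toList
    rw [List.nil_append]
    exact maxCnt_perm _ _ (PySem.List.sorted_perm _ _ _)
  show (if 2 * ((s.toList.foldl checkStep (PySem.Dict.empty, 0)).2) ≤ (s.toList.length : Int) + 1
          then (1:Int) else -1)
      = (if 2 * (((PySem.List.sorted s.toList (fun c => c) false).foldl runStep (none, 0, 0)).2.2)
            ≤ (s.toList.length : Int) + 1 then (1:Int) else -1)
  rw [hA, hB]

-- ===== VERDICT =====
theorem check_spec : Claim_equal_check := by
  intro s _
  unfold Spec_check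
  exact check_eq_alt s
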